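-- pv_equiv track=rewrite | github.com/Selenestica/apex-legends-armory | new_cmd_scores.py | get_sport_id_and_name
-- ===== SOURCE A (Python) =====
-- def get_sport_id_and_name(body):
--     body_list = str(body).lower().split(" ")
--     ncaa_foot_list = ["NCAA Football", "ncaa football", "ncaa", "1"]
--     nfl_list = ["NFL", "nfl", "2", "nlf"]
--     mlb_list = ["MLB", "3", "mlb", "mbl", "baseball"]
--     nba_list = ["NBA", "nba", "4", "nab"]
--     ncaa_mens_bb_list = ["NCAA Men's Basketball",
--                          "ncaa mens basketball", "ncaa men's basketball", "5"]
--     nhl_list = ["NHL", "6", "nhl", "nlh"]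
--     ufc_list = ["UFC/MMA", "7", "mma", "ufc", "ufc/mma", "mam", "ucf"]
--     wnba_list = ["WNBA", "wnba", "8", "wbna"]
--     cfl_list = ["CFL", "cfl", "clf", "9"]
--     mls_ist = ["MLS", "10", "msl", "mls", "soccer"]
--     sport_dict = {"1": ncaa_foot_list, "2": nfl_list, "3": mlb_list, "4": nba_list,
--                   "5": ncaa_mens_bb_list, "6": nhl_list, "7": ufc_list, "8": wnba_list, "9": cfl_list, "10": mls_ist}
--     sport_id = 0
--     sport_name = ""
--     for word in body_list:
--         for k, v in sport_dict.items():
--             if word in v: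
--                 sport_id = int(k)
--                 sport_name = v[0]
--     return sport_id, sport_name
-- ===== SOURCE B (Python) =====
-- _SPORT_LISTS = [
--     ["NCAA Football", "ncaa football", "ncaa", "1"],
--     ["NFL", "nfl", "2", "nlf"],
--     ["MLB", "3", "mlb", "mbl", "baseball"],
--     ["NBA", "nba", "4", "nab"],
--     ["NCAA Men's Basketball", "ncaa mens basketball", "ncaa men's basketball", "5"],
--     ["NHL", "6", "nhl", "nlh"],
--     ["UFC/MMA", "7", "mma", "ufc", "ufc/mma", "mam", "ucf"],
--     ["WNBA", "wnba", "8", "wbna"],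
--     ["CFL", "cfl", "clf", "9"],
--     ["MLS", "10", "msl", "mls", "soccer"],
-- ]
--
-- # reverse index: keyword -> (sport_id, sport_name); later lists overwrite earlier
-- _LOOKUP = {}
-- for _sid, _names in enumerate(_SPORT_LISTS, start=1):
--     for _kw in _names:
--         _LOOKUP[_kw] = (_sid, _names[0])
--
--
-- def get_sport_id_and_name(body):
--     # last match wins == first match scanning the words backwards: early-exit reverse scan
--     for word in reversed(str(body).lower().split(" ")):
--         hit = _LOOKUP.get(word)
--         if hit is not None:
--             return hit
--     return 0, ""
-- ===== Notes on version B (the rewrite author's own statement) =====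
-- stated objective: alternative
-- what changed: Instead of A's forward last-match-wins accumulation with an inner 10-list scan per word, B builds a keyword->(id,name) reverse index once and scans the words BACKWARDS, returning on the first hit (first hit in reverse = last match forward), so it is an early-exit reverse traversal with no accumulator.
import Mathlib
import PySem

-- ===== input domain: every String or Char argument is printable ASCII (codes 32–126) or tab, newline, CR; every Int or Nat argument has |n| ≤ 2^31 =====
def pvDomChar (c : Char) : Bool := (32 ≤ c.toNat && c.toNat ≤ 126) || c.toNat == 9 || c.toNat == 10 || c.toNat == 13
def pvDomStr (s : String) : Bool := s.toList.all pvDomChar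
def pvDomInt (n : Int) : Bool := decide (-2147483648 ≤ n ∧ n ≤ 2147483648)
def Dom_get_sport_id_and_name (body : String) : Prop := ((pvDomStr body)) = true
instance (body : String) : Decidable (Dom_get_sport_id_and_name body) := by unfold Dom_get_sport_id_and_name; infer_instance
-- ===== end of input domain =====

-- B replaces A's forward last-match-wins accumulation (inner 10-list scan per word) by an
-- early-exit BACKWARD scan over the words with a precomputed keyword → (id, name) index
-- (first hit in reverse = last match forward); objective: alternative.

-- ===== PORT A =====
-- int(k) and v[0] are total here: every key of the literal dict is a decimal numeral and every
-- value list is nonempty, so the .getD defaults are never used.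
def get_sport_id_and_name (body : String) : Int × String :=
  let body_list := (PySem.Str.split? (PySem.Str.lower body) " ").getD []   -- sep " " ≠ "", exact
  let ncaa_foot_list := ["NCAA Football", "ncaa football", "ncaa", "1"]
  let nfl_list := ["NFL", "nfl", "2", "nlf"]
  let mlb_list := ["MLB", "3", "mlb", "mbl", "baseball"]
  let nba_list := ["NBA", "nba", "4", "nab"]
  let ncaa_mens_bb_list := ["NCAA Men's Basketball", "ncaa mens basketball", "ncaa men's basketball", "5"]
  let nhl_list := ["NHL", "6", "nhl", "nlh"]
  let ufc_list := ["UFC/MMA", "7", "mma", "ufc", "ufc/mma", "mam", "ucf"]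
  let wnba_list := ["WNBA", "wnba", "8", "wbna"]
  let cfl_list := ["CFL", "cfl", "clf", "9"]
  let mls_ist := ["MLS", "10", "msl", "mls", "soccer"]
  let sport_dict : PySem.Dict String (List String) := PySem.Dict.ofList
    [("1", ncaa_foot_list), ("2", nfl_list), ("3", mlb_list), ("4", nba_list),
     ("5", ncaa_mens_bb_list), ("6", nhl_list), ("7", ufc_list), ("8", wnba_list),
     ("9", cfl_list), ("10", mls_ist)]
  body_list.foldl
    (fun s word =>
      sport_dict.items.foldl
        (fun s kv =>
          if word ∈ kv.2 then ((PySem.Int.ofStr? kv.1).getD 0, PySem.List.pyGetD kv.2 0 "")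
          else s)
        s)
    (0, "")

-- ===== PORT B =====
def sport_lists : List (List String) :=
  [["NCAA Football", "ncaa football", "ncaa", "1"],
   ["NFL", "nfl", "2", "nlf"],
   ["MLB", "3", "mlb", "mbl", "baseball"],
   ["NBA", "nba", "4", "nab"],
   ["NCAA Men's Basketball", "ncaa mens basketball", "ncaa men's basketball", "5"],
   ["NHL", "6", "nhl", "nlh"],
   ["UFC/MMA", "7", "mma", "ufc", "ufc/mma", "mam", "ucf"],
   ["WNBA", "wnba", "8", "wbna"],
   ["CFL", "cfl", "clf", "9"],
   ["MLS", "10", "msl", "mls", "soccer"]]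

-- reverse index keyword → (sport_id, sport_name); later lists overwrite earlier
def sport_lookup : PySem.Dict String (Int × String) :=
  (PySem.List.enumerate sport_lists 1).foldl
    (fun d p => p.2.foldl (fun d kw => d.insert kw (p.1, PySem.List.pyGetD p.2 0 "")) d)
    PySem.Dict.empty

-- the early-exit loop of Source B: first hit scanning the (already reversed) word list,
-- with the module-level reverse index passed in
def scan_first_hit (lookup : PySem.Dict String (Int × String)) : List String → Int × String
  | [] => (0, "")
  | w :: ws =>
    match lookup.get? w with
    | some hit => hit
    | none => scan_first_hit lookup ws

def get_sport_id_and_name_alt (body : String) : Int × String :=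
  scan_first_hit sport_lookup (((PySem.Str.split? (PySem.Str.lower body) " ").getD []).reverse)

-- ===== PRECONDITION & SPEC =====
def Spec_get_sport_id_and_name (body : String) (out : Int × String) : Prop := out = get_sport_id_and_name_alt body
instance (body : String) (out : Int × String) : Decidable (Spec_get_sport_id_and_name body out) := by unfold Spec_get_sport_id_and_name; infer_instance

-- ===== CLAIM (what is proved, stated in full; the proofs are below) =====
def Claim_equal_get_sport_id_and_name : Prop := ∀ (body : String), Dom_get_sport_id_and_name body → Spec_get_sport_id_and_name body (get_sport_id_and_name body)

-- ===== LEMMAS AND PROOFS =====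

def sport_keys : List String := ["NCAA Football", "ncaa football", "ncaa", "1", "NFL", "nfl", "2", "nlf", "MLB", "3", "mlb", "mbl", "baseball", "NBA", "nba", "4", "nab", "NCAA Men's Basketball", "ncaa mens basketball", "ncaa men's basketball", "5", "NHL", "6", "nhl", "nlh", "UFC/MMA", "7", "mma", "ufc", "ufc/mma", "mam", "ucf", "WNBA", "wnba", "8", "wbna", "CFL", "cfl", "clf", "9", "MLS", "10", "msl", "mls", "soccer"]

set_option maxRecDepth 10000 in
lemma sport_lookup_items :
    sport_lookup = PySem.Dict.mk [("NCAA Football", (1, "NCAA Football")), ("ncaa football", (1, "NCAA Football")), ("ncaa", (1, "NCAA Football")), ("1", (1, "NCAA Football")), ("NFL", (2, "NFL")), ("nfl", (2, "NFL")), ("2", (2, "NFL")), ("nlf", (2, "NFL")), ("MLB", (3, "MLB")), ("3", (3, "MLB")), ("mlb", (3, "MLB")), ("mbl", (3, "MLB")), ("baseball", (3, "MLB")), ("NBA", (4, "NBA")), ("nba", (4, "NBA")), ("4", (4, "NBA")), ("nab", (4, "NBA")), ("NCAA Men's Basketball", (5, "NCAA Men's Basketball")), ("ncaa mens basketball", (5,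 "NCAA Men's Basketball")), ("ncaa men's basketball", (5, "NCAA Men's Basketball")), ("5", (5, "NCAA Men's Basketball")), ("NHL", (6, "NHL")), ("6", (6, "NHL")), ("nhl", (6, "NHL")), ("nlh", (6, "NHL")), ("UFC/MMA", (7, "UFC/MMA")), ("7", (7, "UFC/MMA")), ("mma", (7, "UFC/MMA")), ("ufc", (7, "UFC/MMA")), ("ufc/mma", (7, "UFC/MMA")), ("mam", (7, "UFC/MMA")), ("ucf", (7, "UFC/MMA")), ("WNBA", (8, "WNBA")), ("wnba", (8, "WNBA")), ("8", (8, "WNBA")), ("wbna", (8, "WNBA")), ("CFL", (9, "CFL")), ("cfl", (9, "CFL")), ("clf", (9, "CFL")), ("9", (9, "CFL")), ("MLS", (10, "MLS")), ("10", (10, "MLS")), ("msl", (10, "MLS")), ("mls", (10, "MLS")), ("soccer", (10, "MLS"))] := by decide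

-- A's inner 10-list scan, as a named step function
def stepA (s : Int × String) (word : String) : Int × String :=
  ([("1", ["NCAA Football", "ncaa football", "ncaa", "1"]), ("2", ["NFL", "nfl", "2", "nlf"]),
    ("3", ["MLB", "3", "mlb", "mbl", "baseball"]), ("4", ["NBA", "nba", "4", "nab"]),
    ("5", ["NCAA Men's Basketball", "ncaa mens basketball", "ncaa men's basketball", "5"]),
    ("6", ["NHL", "6", "nhl", "nlh"]), ("7", ["UFC/MMA", "7", "mma", "ufc", "ufc/mma", "mam", "ucf"]),
    ("8", ["WNBA", "wnba", "8", "wbna"]), ("9", ["CFL", "cfl", "clf", "9"]),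
    ("10", ["MLS", "10", "msl", "mls", "soccer"])] : List (String × List String)).foldl
    (fun s kv =>
      if word ∈ kv.2 then ((PySem.Int.ofStr? kv.1).getD 0, PySem.List.pyGetD kv.2 0 "") else s)
    s

-- same step phrased through the reverse index
def stepB (s : Int × String) (word : String) : Int × String :=
  match sport_lookup.get? word with | some hit => hit | none => s

lemma step_eq (w : String) (s : Int × String) : stepA s w = stepB s w := by
  unfold stepA stepB
  rw [sport_lookup_items]
  by_cases hw : w ∈ sport_keys
  · simp only [sport_keys, List.mem_cons, List.not_mem_nil, or_false] at hw
    rcases hw with rfl|rfl|rfl|rfl|rfl|rfl|rfl|rfl|rfl|rfl|rfl|rfl|rfl|rfl|rfl|rfl|rfl|rfl|rfl|rfl|rfl|rfl|rfl|rfl|rfl|rfl|rfl|rfl|rfl|rfl|rfl|rfl|rfl|rfl|rfl|rfl|rfl|rfl|rfl|rfl|rfl|rfl|rfl|rfl|rfl <;> rfl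
  · simp only [sport_keys, List.mem_cons, List.not_mem_nil, or_false, not_or] at hw
    obtain ⟨h0, h1, h2, h3, h4, h5, h6, h7, h8, h9, h10, h11, h12, h13, h14, h15, h16, h17, h18, h19, h20, h21, h22, h23, h24, h25, h26, h27, h28, h29, h30, h31, h32, h33, h34, h35, h36, h37, h38, h39, h40, h41, h42, h43, h44⟩ := hw
    simp [List.foldl, h0, h1, h2, h3, h4, h5, h6, h7, h8, h9, h10, h11, h12, h13, h14, h15, h16, h17, h18, h19, h20, h21, h22, h23, h24, h25, h26, h27, h28, h29, h30, h31, h32, h33, h34, h35, h36, h37, h38, h39, h40, h41, h42, h43, h44, Ne.symm h0, Ne.symm h1, Ne.symm h2, Ne.symm h3, Ne.symm h4, Ne.symm h5, Ne.symm h6, Ne.symm h7, Ne.symm h8, Ne.symm h9, Ne.symm h10, Ne.symm h11, Ne.symm h12, Ne.symm h13, Ne.symm h14, Ne.symm h15, Ne.symm h16, Ne.symm h17, Ne.symm h18, Ne.symm h19, Ne.symm h20, Ne.symm h21, Ne.symm h22, Ne.symm h23, Ne.symm h24, Ne.symm h25, Ne.symm h26, Ne.symm h27, Ne.symm h28, Ne.symm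 h29, Ne.symm h30, Ne.symm h31, Ne.symm h32, Ne.symm h33, Ne.symm h34, Ne.symm h35, Ne.symm h36, Ne.symm h37, Ne.symm h38, Ne.symm h39, Ne.symm h40, Ne.symm h41, Ne.symm h42, Ne.symm h43, Ne.symm h44, PySem.Dict.get?]

-- first hit in ws, as an Option (proof helper characterising scan_first_hit)
def firstHit (lookup : PySem.Dict String (Int × String)) : List String → Option (Int × String)
  | [] => none
  | w :: ws =>
    match lookup.get? w with
    | some hit => some hit
    | none => firstHit lookup ws

set_option maxRecDepth 10000 in
lemma scan_eq_firstHit (lookup : PySem.Dict String (Int × String)) (ws : List String) :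
    scan_first_hit lookup ws = (firstHit lookup ws).getD (0, "") := by
  induction ws with
  | nil => rfl
  | cons w ws ih =>
    simp only [scan_first_hit, firstHit]
    cases lookup.get? w with
    | some hit => rfl
    | none => exact ih

-- forward last-match-wins fold = first hit of the reversed list (falling back to the seed)
set_option maxRecDepth 10000 in
lemma foldl_stepB_rev (ws : List String) (s : Int × String) :
    ws.reverse.foldl stepB s = (firstHit sport_lookup ws).getD s := by
  induction ws generalizing s with
  | nil => rfl
  | cons w ws ih =>
    simp only [List.reverse_cons, List.foldl_append, List.foldl_cons, List.foldl_nil, firstHit, ih]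
    unfold stepB
    cases sport_lookup.get? w with
    | some hit => rfl
    | none => rfl

lemma foldl_stepB (ws : List String) (s : Int × String) :
    ws.foldl stepB s = (firstHit sport_lookup ws.reverse).getD s := by
  have := foldl_stepB_rev ws.reverse s
  rwa [List.reverse_reverse] at this

lemma fold_eq (ws : List String) (s : Int × String) :
    ws.foldl stepA s = ws.foldl stepB s := by
  induction ws generalizing s with
  | nil => simp only [List.foldl_nil]
  | cons w ws ih => rw [List.foldl_cons, List.foldl_cons, step_eq w s]; exact ih _

-- ===== VERDICT (by name: the statement is the Claim_ definition above) =====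
set_option maxRecDepth 100000 in
theorem get_sport_id_and_name_spec : Claim_equal_get_sport_id_and_name := by
  intro body _
  unfold Spec_get_sport_id_and_name get_sport_id_and_name get_sport_id_and_name_alt
  rw [scan_eq_firstHit]
  exact (fold_eq _ _).trans (foldl_stepB _ _)
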